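-- pv_equiv track=rewrite | github.com/GabrielAngelAlvaTaibo/alvareztaibo_gabriel_pp__ | teorico.py | determinar_caracteres
-- ===== SOURCE A (Python) =====
-- def determinar_caracteres(cadena: str) -> str:
--     """recibe una cadena de caracteres y realiza el conteo total de caracteres,
--     vocales en mayusculas y todas las palabras.
--
--     Args:
--         cadena (str): Es el parametro string que recibe.
--
--     Returns:
--         str: Es el retorno de los resultados del conteo.
--     """
--     cantidad_vocales = 0
--     cantidad_caracteres = 0
--     cantidad_palabras = 0
--     for i in range(0, len(cadena)):
--         if not(cadena[i] == "" or cadena[i] == " "):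
--             cantidad_palabras += 1
--             cantidad_caracteres += 1
--             match cadena[i]:
--                 case "A" | "E" | "I" | "O" | "U":
--                     cantidad_vocales += 1
--                 case _:
--                     pass
--         else:
--             cantidad_palabras += 1
--
--     mensaje = f"Se econtraron {cantidad_vocales} vocales en mayusculas \n Se econtraron {cantidad_caracteres} caracteres \n Se econtraron {cantidad_palabras} palabras"
--     return mensaje
-- ===== SOURCE B (Python) =====
-- def determinar_caracteres(cadena: str) -> str:
--     """Same result as A, computed from direct aggregates instead of a per-character loop."""
--     cantidad_palabras = len(cadena)
--     cantidad_caracteres = cantidad_palabras - cadena.count(' ')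
--     cantidad_vocales = sum(cadena.count(v) for v in "AEIOU")
--     mensaje = f"Se econtraron {cantidad_vocales} vocales en mayusculas \n Se econtraron {cantidad_caracteres} caracteres \n Se econtraron {cantidad_palabras} palabras"
--     return mensaje
-- ===== Notes on version B (the rewrite author's own statement) =====
-- stated objective: simpler
-- what changed: Replaced the indexed per-character loop with three branching counters by direct aggregates: palabras = len(cadena), caracteres = len minus the space count, vocales = the sum of cadena.count(v) over the five uppercase vowels, then the same f-string.
import Mathlib
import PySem

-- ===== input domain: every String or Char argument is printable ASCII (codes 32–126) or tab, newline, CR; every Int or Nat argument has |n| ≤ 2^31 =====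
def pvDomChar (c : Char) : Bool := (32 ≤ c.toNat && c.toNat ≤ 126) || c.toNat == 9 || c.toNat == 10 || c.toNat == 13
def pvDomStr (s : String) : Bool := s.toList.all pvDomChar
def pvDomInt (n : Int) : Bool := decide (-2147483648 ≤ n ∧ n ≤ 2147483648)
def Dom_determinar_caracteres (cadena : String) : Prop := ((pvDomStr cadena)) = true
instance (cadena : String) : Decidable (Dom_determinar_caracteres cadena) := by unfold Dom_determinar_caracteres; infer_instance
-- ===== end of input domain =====

-- B replaces A's indexed loop with direct aggregates (len, count ' ', counts of the vowels); same message string.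

-- ===== PORT A =====
-- the loop body; 'cadena[i] == ""' in A is always False for a character, kept as 'false ||'
def pvStepA (acc : Int × Int × Int) (c : Char) : Int × Int × Int :=
  if !(false || c == ' ') then
    (acc.1 + (if c == 'A' || c == 'E' || c == 'I' || c == 'O' || c == 'U' then 1 else 0),
     acc.2.1 + 1, acc.2.2 + 1)
  else (acc.1, acc.2.1, acc.2.2 + 1)

-- 'for i in range(0, len(cadena)): … cadena[i] …' visits the characters in order
def determinar_caracteres (cadena : String) : String :=
  let s := cadena.toList.foldl pvStepA (0, 0, 0)
  "Se econtraron " ++ PySem.Int.toStr s.1 ++ " vocales en mayusculas \n Se econtraron "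
    ++ PySem.Int.toStr s.2.1 ++ " caracteres \n Se econtraron "
    ++ PySem.Int.toStr s.2.2 ++ " palabras"

-- ===== PORT B =====
def determinar_caracteres_alt (cadena : String) : String :=
  let cantidad_palabras : Int := (PySem.Str.len cadena : Int)
  let cantidad_caracteres : Int := cantidad_palabras - (PySem.Str.count cadena " " : Int)
  let cantidad_vocales : Int :=
    (["A", "E", "I", "O", "U"].map (fun v => (PySem.Str.count cadena v : Int))).sum
  "Se econtraron " ++ PySem.Int.toStr cantidad_vocales ++ " vocales en mayusculas \n Se econtraron "
    ++ PySem.Int.toStr cantidad_caracteres ++ " caracteres \n Se econtraron "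
    ++ PySem.Int.toStr cantidad_palabras ++ " palabras"

-- ===== PRECONDITION & SPEC =====
def Spec_determinar_caracteres (cadena : String) (out : String) : Prop := out = determinar_caracteres_alt cadena
instance (cadena : String) (out : String) : Decidable (Spec_determinar_caracteres cadena out) := by unfold Spec_determinar_caracteres; infer_instance

-- ===== CLAIM (what is proved, stated in full; the proofs are below) =====
def Claim_equal_determinar_caracteres : Prop := ∀ (cadena : String), Dom_determinar_caracteres cadena → Spec_determinar_caracteres cadena (determinar_caracteres cadena)

-- ===== LEMMAS AND PROOFS =====

-- single-character substring count is element count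
lemma count_go_singleton (v : Char) :
    ∀ (fuel : Nat) (l : List Char) (acc : Nat), l.length ≤ fuel →
      PySem.Chars.count.go [v] fuel l acc = acc + l.count v := by
  intro fuel
  induction fuel with
  | zero =>
    intro l acc h
    cases l with
    | nil => simp [PySem.Chars.count.go]
    | cons a t => simp at h
  | succ n ih =>
    intro l acc h
    cases l with
    | nil => simp [PySem.Chars.count.go]
    | cons a t =>
      simp only [PySem.Chars.count.go, List.isPrefixOf, List.count_cons]
      by_cases hv : v == a
      · simp only [hv, Bool.true_and]
        rw [if_pos (by simp)]
        simp only [List.length_cons, List.length_nil, List.drop_succ_cons, List.drop_zero]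
        rw [ih t (acc + 1) (by simpa using Nat.le_of_succ_le_succ h)]
        have hva : a = v := (beq_iff_eq.mp hv).symm
        simp [hva]
        omega
      · rw [if_neg (by simp [hv])]
        rw [ih t acc (by simpa using Nat.le_of_succ_le_succ h)]
        have hne : ¬ (a = v) := fun e => hv (by simp [e])
        simp [hne]

lemma chars_count_singleton (l : List Char) (v : Char) :
    PySem.Chars.count l [v] = l.count v := by
  unfold PySem.Chars.count
  simpa using count_go_singleton v l.length l 0 le_rfl

def pvVowel (c : Char) : Bool := c == 'A' || c == 'E' || c == 'I' || c == 'O' || c == 'U'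

lemma loopA (l : List Char) (v c p : Int) :
    l.foldl pvStepA (v, c, p) =
      (v + (l.countP pvVowel : Int), c + (l.countP (fun x => !(x == ' ')) : Int), p + l.length) := by
  induction l generalizing v c p with
  | nil => simp
  | cons a t ih =>
    simp only [List.foldl_cons]
    have hstep : pvStepA (v, c, p) a =
        (v + (if pvVowel a then 1 else 0), c + (if a == ' ' then 0 else 1), p + 1) := by
      by_cases hs : a = ' '
      · simp [pvStepA, pvVowel, hs]
      · cases hvb : pvVowel a
        · simp only [pvVowel] at hvb
          simp [pvStepA, hs, hvb]
        · simp only [pvVowel] at hvb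
          simp [pvStepA, hs, hvb]
    rw [hstep, ih]
    simp only [List.countP_cons, List.length_cons]
    refine Prod.ext ?_ (Prod.ext ?_ ?_)
    · by_cases hvb : pvVowel a <;> simp [hvb] <;> push_cast <;> ring
    · by_cases hs : (a == ' ') = true <;> simp [hs] <;> push_cast <;> ring
    · push_cast; ring

lemma countP_vowel (l : List Char) :
    l.countP pvVowel =
      l.count 'A' + l.count 'E' + l.count 'I' + l.count 'O' + l.count 'U' := by
  induction l with
  | nil => simp
  | cons a t ih =>
    simp only [List.countP_cons, List.count_cons, pvVowel]
    by_cases hA : a = 'A'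
    · simp [hA]; omega
    · by_cases hE : a = 'E'
      · simp [hE]; omega
      · by_cases hI : a = 'I'
        · simp [hI]; omega
        · by_cases hO : a = 'O'
          · simp [hO]; omega
          · by_cases hU : a = 'U'
            · simp [hU]; omega
            · simp [hA, hE, hI, hO, hU, ih]

lemma countP_nonspace_nat (l : List Char) :
    l.countP (fun x => !(x == ' ')) + l.count ' ' = l.length := by
  induction l with
  | nil => simp
  | cons a t ih =>
    by_cases hs : a = ' ' <;> simp [List.countP_cons, List.count_cons, hs] <;> omega

lemma countP_nonspace (l : List Char) :
    (l.countP (fun x => !(x == ' ')) : Int) = (l.length : Int) - (l.count ' ' : Int) := by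
  have h := countP_nonspace_nat l
  omega

-- ===== VERDICT (by name: the statement is the Claim_ definition above) =====
theorem determinar_caracteres_spec : Claim_equal_determinar_caracteres := by
  intro cadena _
  unfold Spec_determinar_caracteres determinar_caracteres determinar_caracteres_alt
  rw [loopA]
  simp only [PySem.Str.count_eq, PySem.Str.len_eq, List.map_cons, List.map_nil,
    List.sum_cons, List.sum_nil, zero_add]
  rw [show ("A" : String).toList = ['A'] from rfl, show ("E" : String).toList = ['E'] from rfl,
      show ("I" : String).toList = ['I'] from rfl, show ("O" : String).toList = ['O'] from rfl,
      show ("U" : String).toList = ['U'] from rfl, show (" " : String).toList = [' '] from rfl]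
  simp only [chars_count_singleton]
  rw [countP_vowel, countP_nonspace]
  push_cast
  ring_nf
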